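-- pv_equiv track=rewrite | github.com/dbdxnuliba/smalldrop | smalldrop/smalldrop_rviz/scripts/controller_error_plot.py | set_visibility
-- ===== SOURCE A (Python) =====
-- def set_visibility(str):
--   """
--   Sets the visibility of the plots.
--   To set, use a string with plot codes separated by commas. If the string is empty
--   all plots show. If not, only valid plots are shown. If no valid plots are presented
--   no plots will be shown.
--
--   Plot codes:
--   px - Position x
--   py - Position y
--   pz - Position z
--   pxd - Position x desired
--   pyd - Position y desired
--   pzd - Position z desired
--   ox - Orientation x
--   oy - Orientation y
--   oz - Orientation z
--   ow - Orientation w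
--   oxd - Orientation x desired
--   oyd - Orientation y desired
--   ozd - Orientation z desired
--   owd - Orientation w desired
--   """
--   visibility = [
--     [True,True,True,True,True,True], # position [x,y,z,x_d,y_d,z_d]
--     [True,True,True,True,True,True,True,True] # orientation [x,y,z,w,x_d,y_d,z_d,w_d]
--   ]
--
--   if str != '':
--     # Turn all off
--     visibility = [
--       [False,False,False,False,False,False], # position [x,y,z,x_d,y_d,z_d]
--       [False,False,False,False,False,False,False,False] # orientation [x,y,z,w,x_d,y_d,z_d,w_d]
--     ]
--     visibles = str.split(",")
--     for i in range(len(visibles)):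
--       # Check the ones selected to be on
--       if visibles[i] == 'px':
--         visibility[0][0] = True
--       elif visibles[i] == 'py':
--         visibility[0][1] = True
--       elif visibles[i] == 'pz':
--         visibility[0][2] = True
--       elif visibles[i] == 'pxd':
--         visibility[0][3] = True
--       elif visibles[i] == 'pyd':
--         visibility[0][4] = True
--       elif visibles[i] == 'pzd':
--         visibility[0][5] = True
--       elif visibles[i] == 'ox':
--         visibility[1][0] = True
--       elif visibles[i] == 'oy':
--         visibility[1][1] = True
--       elif visibles[i] == 'oz':
--         visibility[1][2] = True
--       elif visibles[i] == 'ow':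
--         visibility[1][3] = True
--       elif visibles[i] == 'oxd':
--         visibility[1][4] = True
--       elif visibles[i] == 'oyd':
--         visibility[1][5] = True
--       elif visibles[i] == 'ozd':
--         visibility[1][6] = True
--       elif visibles[i] == 'owd':
--         visibility[1][7] = True
--
--   return visibility
-- ===== SOURCE B (Python) =====
-- POS_CODES = ['px', 'py', 'pz', 'pxd', 'pyd', 'pzd']
-- ORI_CODES = ['ox', 'oy', 'oz', 'ow', 'oxd', 'oyd', 'ozd', 'owd']
--
-- def set_visibility(str):
--   if str == '':
--     return [[True] * 6, [True] * 8]
--   selected = set(str.split(','))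
--   return [[c in selected for c in POS_CODES],
--           [c in selected for c in ORI_CODES]]
-- ===== Notes on version B (the rewrite author's own statement) =====
-- stated objective: idiomatic
-- what changed: Instead of scanning the input tokens and flipping individual slots through a 14-branch elif chain, B builds a set of the tokens once and maps the fixed canonical code lists to membership tests, constructing each row in one comprehension.
import Mathlib
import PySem

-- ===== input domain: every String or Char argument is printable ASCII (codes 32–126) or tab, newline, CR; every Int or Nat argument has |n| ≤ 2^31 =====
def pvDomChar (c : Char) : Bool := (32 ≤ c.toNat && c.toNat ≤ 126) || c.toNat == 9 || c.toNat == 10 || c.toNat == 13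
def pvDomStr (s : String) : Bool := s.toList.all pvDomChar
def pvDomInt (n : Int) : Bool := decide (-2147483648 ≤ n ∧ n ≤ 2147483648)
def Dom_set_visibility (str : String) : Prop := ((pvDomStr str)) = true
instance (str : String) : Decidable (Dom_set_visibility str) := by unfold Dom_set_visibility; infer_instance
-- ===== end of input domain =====

-- B replaces A's per-token 14-branch elif chain by one set of the tokens plus membership maps over the canonical code lists (objective: idiomatic).

-- ===== PORT A =====
-- visibility[i][j] = True
def setVis (vis : List (List Bool)) (i j : Nat) : List (List Bool) :=
  vis.set i ((vis.getD i []).set j true)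

def stepA (vis : List (List Bool)) (t : String) : List (List Bool) :=
  if t == "px" then setVis vis 0 0
  else if t == "py" then setVis vis 0 1
  else if t == "pz" then setVis vis 0 2
  else if t == "pxd" then setVis vis 0 3
  else if t == "pyd" then setVis vis 0 4
  else if t == "pzd" then setVis vis 0 5
  else if t == "ox" then setVis vis 1 0
  else if t == "oy" then setVis vis 1 1
  else if t == "oz" then setVis vis 1 2
  else if t == "ow" then setVis vis 1 3
  else if t == "oxd" then setVis vis 1 4
  else if t == "oyd" then setVis vis 1 5
  else if t == "ozd" then setVis vis 1 6
  else if t == "owd" then setVis vis 1 7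
  else vis

def set_visibility (str : String) : List (List Bool) :=
  if str != "" then
    -- str.split(","): the separator is non-empty, so split? is always `some`
    ((PySem.Str.split? str ",").getD []).foldl stepA
      [[false, false, false, false, false, false],
       [false, false, false, false, false, false, false, false]]
  else
    [[true, true, true, true, true, true],
     [true, true, true, true, true, true, true, true]]

-- ===== PORT B =====
def posCodes : List String := ["px", "py", "pz", "pxd", "pyd", "pzd"]
def oriCodes : List String := ["ox", "oy", "oz", "ow", "oxd", "oyd", "ozd", "owd"]

def set_visibility_alt (str : String) : List (List Bool) :=
  if str == "" then
    [List.replicate 6 true, List.replicate 8 true]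
  else
    let selected := PySem.Set.ofList ((PySem.Str.split? str ",").getD [])
    [posCodes.map (fun c => selected.contains c),
     oriCodes.map (fun c => selected.contains c)]

-- ===== PRECONDITION & SPEC =====
def Spec_set_visibility (str : String) (out : List (List Bool)) : Prop := out = set_visibility_alt str
instance (str : String) (out : List (List Bool)) : Decidable (Spec_set_visibility str out) := by unfold Spec_set_visibility; infer_instance

-- ===== CLAIM (what is proved, stated in full; the proofs are below) =====
def Claim_equal_set_visibility : Prop := ∀ (str : String), Dom_set_visibility str → Spec_set_visibility str (set_visibility str)

-- ===== LEMMAS AND PROOFS =====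

-- one step of A's loop ORs each slot with the outcome of its token test
theorem beq_decide (t c : String) : (t == c) = decide (c = t) := by
  by_cases h : c = t
  · subst h; simp
  · have h' : ¬ (t = c) := fun e => h e.symm
    simp [h, h']

theorem stepA_eq (t : String) (a0 a1 a2 a3 a4 a5 b0 b1 b2 b3 b4 b5 b6 b7 : Bool) :
    stepA [[a0, a1, a2, a3, a4, a5], [b0, b1, b2, b3, b4, b5, b6, b7]] t
    = [[a0 || (t == "px"), a1 || (t == "py"), a2 || (t == "pz"),
        a3 || (t == "pxd"), a4 || (t == "pyd"), a5 || (t == "pzd")],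
       [b0 || (t == "ox"), b1 || (t == "oy"), b2 || (t == "oz"),
        b3 || (t == "ow"), b4 || (t == "oxd"), b5 || (t == "oyd"),
        b6 || (t == "ozd"), b7 || (t == "owd")]] := by
  by_cases h1 : t = "px"
  · subst h1; simp [stepA, setVis, List.getD]
  by_cases h2 : t = "py"
  · subst h2; simp [stepA, setVis, List.getD]
  by_cases h3 : t = "pz"
  · subst h3; simp [stepA, setVis, List.getD]
  by_cases h4 : t = "pxd"
  · subst h4; simp [stepA, setVis, List.getD]
  by_cases h5 : t = "pyd"
  · subst h5; simp [stepA, setVis, List.getD]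
  by_cases h6 : t = "pzd"
  · subst h6; simp [stepA, setVis, List.getD]
  by_cases h7 : t = "ox"
  · subst h7; simp [stepA, setVis, List.getD]
  by_cases h8 : t = "oy"
  · subst h8; simp [stepA, setVis, List.getD]
  by_cases h9 : t = "oz"
  · subst h9; simp [stepA, setVis, List.getD]
  by_cases h10 : t = "ow"
  · subst h10; simp [stepA, setVis, List.getD]
  by_cases h11 : t = "oxd"
  · subst h11; simp [stepA, setVis, List.getD]
  by_cases h12 : t = "oyd"
  · subst h12; simp [stepA, setVis, List.getD]
  by_cases h13 : t = "ozd"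
  · subst h13; simp [stepA, setVis, List.getD]
  by_cases h14 : t = "owd"
  · subst h14; simp [stepA, setVis, List.getD]
  simp [stepA, h1, h2, h3, h4, h5, h6, h7, h8, h9, h10, h11, h12, h13, h14]

-- A's whole loop computes, slot by slot, the OR of the initial slot with token membership
theorem foldA (toks : List String) (a0 a1 a2 a3 a4 a5 b0 b1 b2 b3 b4 b5 b6 b7 : Bool) :
    List.foldl stepA
      [[a0, a1, a2, a3, a4, a5], [b0, b1, b2, b3, b4, b5, b6, b7]] toks
    = [[a0 || toks.contains "px", a1 || toks.contains "py", a2 || toks.contains "pz",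
        a3 || toks.contains "pxd", a4 || toks.contains "pyd", a5 || toks.contains "pzd"],
       [b0 || toks.contains "ox", b1 || toks.contains "oy", b2 || toks.contains "oz",
        b3 || toks.contains "ow", b4 || toks.contains "oxd", b5 || toks.contains "oyd",
        b6 || toks.contains "ozd", b7 || toks.contains "owd"]] := by
  induction toks generalizing a0 a1 a2 a3 a4 a5 b0 b1 b2 b3 b4 b5 b6 b7 with
  | nil => simp
  | cons t ts ih =>
    rw [List.foldl_cons, stepA_eq, ih]
    simp [Bool.or_assoc, beq_decide]


theorem set_visibility_eq (str : String) : set_visibility str = set_visibility_alt str := by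
  unfold set_visibility set_visibility_alt
  by_cases h : str = ""
  · simp [h]
  · simp only [h, bne_iff_ne, ne_eq, not_false_eq_true, if_true, beq_iff_eq]
    rw [foldA]
    simp [posCodes, oriCodes]

-- ===== VERDICT (by name: the statement is the Claim_ definition above) =====
theorem set_visibility_spec : Claim_equal_set_visibility := by
  intro str _
  unfold Spec_set_visibility
  exact set_visibility_eq str
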